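-- pv_equiv track=rewrite | github.com/tingyu215/SECLA | scripts/run_test_null.py | get_noname_indices
-- ===== SOURCE A (Python) =====
-- def indices(lst, item):
--     return [i for i, x in enumerate(lst) if x == item]
--
-- def get_noname_indices(gt_link_list):
--     linked_list = [links[1] for links in gt_link_list]
--     noface_indices = indices(linked_list, ["NOFACE"])
--     # noface_indices = indices([links[0] for links in gt_link_list], ["NOFACE"])
--     if ["NOFACE"] in linked_list and ["NONAME"] in linked_list:
--         noname_indices = indices(linked_list, ["NONAME"])
--         linked_list_noface = [item for item in linked_list if item != ["NOFACE"]]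
--         noname_indices_sim = indices(linked_list_noface, ["NONAME"])
--     elif ["NONAME"] in linked_list:
--         noname_indices = indices(linked_list, ["NONAME"])
--         noname_indices_sim = indices(linked_list, ["NONAME"])
--     else:
--         noname_indices = []
--         noname_indices_sim = []
--     return noname_indices, noname_indices_sim, noface_indices
-- ===== SOURCE B (Python) =====
-- def get_noname_indices(gt_link_list):
--     noname_indices, noname_indices_sim, noface_indices = [], [], []
--     j = 0  # position among non-NOFACE entries
--     for i, links in enumerate(gt_link_list):
--         x = links[1]
--         if x == ["NOFACE"]:
--             noface_indices.append(i)
--         else: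
--             if x == ["NONAME"]:
--                 noname_indices.append(i)
--                 noname_indices_sim.append(j)
--             j += 1
--     return noname_indices, noname_indices_sim, noface_indices
-- ===== Notes on version B (the rewrite author's own statement) =====
-- stated objective: simpler
-- what changed: Replaces the intermediate mapped list, two membership tests, up to three full indices() scans and a filter pass by one single loop that tracks the original index and a counter of non-NOFACE positions.
import Mathlib
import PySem

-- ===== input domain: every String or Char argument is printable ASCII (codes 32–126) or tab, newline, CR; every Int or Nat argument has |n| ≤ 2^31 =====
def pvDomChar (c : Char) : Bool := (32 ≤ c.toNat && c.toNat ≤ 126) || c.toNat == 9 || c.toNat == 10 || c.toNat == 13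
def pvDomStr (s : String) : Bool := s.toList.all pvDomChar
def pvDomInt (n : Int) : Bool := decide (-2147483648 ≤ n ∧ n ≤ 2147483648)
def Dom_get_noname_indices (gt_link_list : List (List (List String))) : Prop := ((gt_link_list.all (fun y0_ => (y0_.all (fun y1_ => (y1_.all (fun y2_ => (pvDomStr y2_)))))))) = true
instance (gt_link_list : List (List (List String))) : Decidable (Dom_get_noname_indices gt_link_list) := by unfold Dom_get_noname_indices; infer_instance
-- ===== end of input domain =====

-- B collapses A's mapped list, membership tests, repeated indices() scans and filter into one loop; return value equivalence only.

-- ===== PORT A =====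
-- links[1]; Pre_ guarantees the index is in range, so getD is never taken
def pvSecond (links : List (List String)) : List String :=
  (PySem.List.pyGet? links 1).getD []

-- helper `indices(lst, item)`
def pvIndices (lst : List (List String)) (item : List String) : List Int :=
  ((PySem.List.enumerate lst 0).filter (fun p => p.2 == item)).map (fun p => p.1)

def get_noname_indices (gt_link_list : List (List (List String))) : List Int × List Int × List Int :=
  let linked_list := gt_link_list.map pvSecond
  let noface_indices := pvIndices linked_list ["NOFACE"]
  if linked_list.contains ["NOFACE"] && linked_list.contains ["NONAME"] then
    let noname_indices := pvIndices linked_list ["NONAME"]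
    let linked_list_noface := linked_list.filter (fun item => !(item == ["NOFACE"]))
    let noname_indices_sim := pvIndices linked_list_noface ["NONAME"]
    (noname_indices, noname_indices_sim, noface_indices)
  else if linked_list.contains ["NONAME"] then
    (pvIndices linked_list ["NONAME"], pvIndices linked_list ["NONAME"], noface_indices)
  else
    ([], [], noface_indices)

-- ===== PORT B =====
def get_noname_indices_alt (gt_link_list : List (List (List String))) : List Int × List Int × List Int :=
  let r := (PySem.List.enumerate gt_link_list 0).foldl
    (fun (st : List Int × List Int × List Int × Int) p =>
      let x := (PySem.List.pyGet? p.2 1).getD []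
      if x == ["NOFACE"] then
        (st.1, st.2.1, st.2.2.1 ++ [p.1], st.2.2.2)
      else if x == ["NONAME"] then
        (st.1 ++ [p.1], st.2.1 ++ [st.2.2.2], st.2.2.1, st.2.2.2 + 1)
      else
        (st.1, st.2.1, st.2.2.1, st.2.2.2 + 1))
    ([], [], [], 0)
  (r.1, r.2.1, r.2.2.1)

-- ===== PRECONDITION & SPEC =====
-- Pre_ excludes exactly the inputs where Python's links[1] raises IndexError (an inner list with fewer than 2 elements).
def Pre_get_noname_indices (gt_link_list : List (List (List String))) : Prop :=
  ∀ links ∈ gt_link_list, 2 ≤ links.length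
instance (gt_link_list : List (List (List String))) : Decidable (Pre_get_noname_indices gt_link_list) := by unfold Pre_get_noname_indices; infer_instance

def pvWitness_get_noname_indices : List (List (List String)) :=
  [[["a"], ["NONAME"]], [["b"], ["NOFACE"]], [["c"], ["x"]]]

def Spec_get_noname_indices (gt_link_list : List (List (List String))) (out : List Int × List Int × List Int) : Prop := out = get_noname_indices_alt gt_link_list
instance (gt_link_list : List (List (List String))) (out : List Int × List Int × List Int) : Decidable (Spec_get_noname_indices gt_link_list out) := by unfold Spec_get_noname_indices; infer_instance

-- ===== CLAIM (what is proved, stated in full; the proofs are below) =====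
def Claim_equal_get_noname_indices : Prop := ∀ (gt_link_list : List (List (List String))), Dom_get_noname_indices gt_link_list → Pre_get_noname_indices gt_link_list → Spec_get_noname_indices gt_link_list (get_noname_indices gt_link_list)

-- ===== LEMMAS AND PROOFS =====

-- pure recursive characterisation of B's loop (proof helper)
def pvGo : List (List (List String)) → Int → Int → List Int × List Int × List Int
  | [], _, _ => ([], [], [])
  | links :: rest, i, j =>
    let x := (PySem.List.pyGet? links 1).getD []
    if x == ["NOFACE"] then
      let r := pvGo rest (i+1) j
      (r.1, r.2.1, i :: r.2.2)
    else if x == ["NONAME"] then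
      let r := pvGo rest (i+1) (j+1)
      (i :: r.1, j :: r.2.1, r.2.2)
    else pvGo rest (i+1) (j+1)

-- count of non-NOFACE entries (final value of B's j)
def pvCnt (l : List (List (List String))) : Int :=
  ((l.filter (fun links => !(pvSecond links == ["NOFACE"]))).length : Int)

theorem pvFoldB (l : List (List (List String))) : ∀ (i j : Int) (na ns nf : List Int),
    (PySem.List.enumerate l i).foldl
      (fun (st : List Int × List Int × List Int × Int) p =>
        let x := (PySem.List.pyGet? p.2 1).getD []
        if x == ["NOFACE"] then
          (st.1, st.2.1, st.2.2.1 ++ [p.1], st.2.2.2)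
        else if x == ["NONAME"] then
          (st.1 ++ [p.1], st.2.1 ++ [st.2.2.2], st.2.2.1, st.2.2.2 + 1)
        else
          (st.1, st.2.1, st.2.2.1, st.2.2.2 + 1))
      (na, ns, nf, j)
    = (na ++ (pvGo l i j).1, ns ++ (pvGo l i j).2.1, nf ++ (pvGo l i j).2.2, j + pvCnt l) := by
  induction l with
  | nil => intro i j na ns nf; simp [pvGo, pvCnt, PySem.List.enumerate_nil]
  | cons links rest ih =>
    intro i j na ns nf
    rw [PySem.List.enumerate_cons]
    simp only [List.foldl_cons]
    by_cases h1 : ((PySem.List.pyGet? links 1).getD [] == ["NOFACE"]) = true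
    · simp only [h1, if_true, pvGo, pvCnt, pvSecond, List.filter_cons]
      rw [ih]
      simp [pvCnt, pvSecond, List.append_assoc]
    · by_cases h2 : ((PySem.List.pyGet? links 1).getD [] == ["NONAME"]) = true
      · simp only [h1, h2, if_true, if_false, Bool.false_eq_true, pvGo, pvCnt, pvSecond,
          List.filter_cons]
        rw [ih]
        simp [pvCnt, pvSecond, List.append_assoc]
        omega
      · simp only [h1, h2, if_false, Bool.false_eq_true, pvGo, pvCnt, pvSecond, List.filter_cons]
        rw [ih]
        simp [pvCnt, pvSecond]
        omega

theorem pvGo1 (l : List (List (List String))) : ∀ (i j : Int),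
    (pvGo l i j).1
      = ((PySem.List.enumerate (l.map pvSecond) i).filter (fun p => p.2 == ["NONAME"])).map (fun p => p.1) := by
  induction l with
  | nil => intro i j; simp [pvGo, PySem.List.enumerate_nil]
  | cons links rest ih =>
    intro i j
    simp only [List.map_cons, PySem.List.enumerate_cons, List.filter_cons, pvGo]
    by_cases h1 : ((PySem.List.pyGet? links 1).getD [] == ["NOFACE"]) = true
    · have h2 : ((PySem.List.pyGet? links 1).getD [] == ["NONAME"]) = false := by
        revert h1; cases hx : (PySem.List.pyGet? links 1).getD [] <;> simp_all
      simp [h1, h2, pvSecond, ih]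
    · by_cases h2 : ((PySem.List.pyGet? links 1).getD [] == ["NONAME"]) = true
      · simp [h1, h2, pvSecond, ih]
      · simp [h1, h2, pvSecond, ih]

theorem pvGo3 (l : List (List (List String))) : ∀ (i j : Int),
    (pvGo l i j).2.2
      = ((PySem.List.enumerate (l.map pvSecond) i).filter (fun p => p.2 == ["NOFACE"])).map (fun p => p.1) := by
  induction l with
  | nil => intro i j; simp [pvGo, PySem.List.enumerate_nil]
  | cons links rest ih =>
    intro i j
    simp only [List.map_cons, PySem.List.enumerate_cons, List.filter_cons, pvGo]
    by_cases h1 : ((PySem.List.pyGet? links 1).getD [] == ["NOFACE"]) = true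
    · simp [h1, pvSecond, ih]
    · by_cases h2 : ((PySem.List.pyGet? links 1).getD [] == ["NONAME"]) = true
      · simp [h1, h2, pvSecond, ih]
      · simp [h1, h2, pvSecond, ih]

theorem pvGo2 (l : List (List (List String))) : ∀ (i j : Int),
    (pvGo l i j).2.1
      = ((PySem.List.enumerate ((l.map pvSecond).filter (fun item => !(item == ["NOFACE"]))) j).filter
          (fun p => p.2 == ["NONAME"])).map (fun p => p.1) := by
  induction l with
  | nil => intro i j; simp [pvGo, PySem.List.enumerate_nil]
  | cons links rest ih =>
    intro i j
    simp only [List.map_cons, List.filter_cons, pvGo]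
    by_cases h1 : ((PySem.List.pyGet? links 1).getD [] == ["NOFACE"]) = true
    · simp [h1, pvSecond, ih]
    · by_cases h2 : ((PySem.List.pyGet? links 1).getD [] == ["NONAME"]) = true
      · simp [h1, h2, pvSecond, PySem.List.enumerate_cons, ih]
      · simp [h1, h2, pvSecond, PySem.List.enumerate_cons, ih]

theorem pvBeqGo (l : List (List (List String))) :
    get_noname_indices_alt l = pvGo l 0 0 := by
  unfold get_noname_indices_alt
  rw [pvFoldB l 0 0 [] [] []]
  simp

theorem pvNoMatch (lst : List (List String)) (item : List String) (h : item ∉ lst) (i : Int) :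
    ((PySem.List.enumerate lst i).filter (fun p => p.2 == item)).map (fun p => p.1) = [] := by
  have hnil : (PySem.List.enumerate lst i).filter (fun p => p.2 == item) = [] := by
    rw [List.filter_eq_nil_iff]
    intro p hp
    simp only [beq_iff_eq]
    intro he
    apply h
    have hm : p.2 ∈ (PySem.List.enumerate lst i).map (fun q => q.2) := List.mem_map_of_mem hp
    rw [PySem.List.map_snd_enumerate] at hm
    rwa [he] at hm
  rw [hnil]
  rfl

-- ===== VERDICT (by name: the statement is the Claim_ definition above) =====
theorem get_noname_indices_spec : Claim_equal_get_noname_indices := by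
  intro l _ _
  unfold Spec_get_noname_indices
  rw [pvBeqGo]
  unfold get_noname_indices
  simp only []
  by_cases hf : (l.map pvSecond).contains ["NOFACE"] = true
  · by_cases hn : (l.map pvSecond).contains ["NONAME"] = true
    · simp only [hf, hn, Bool.and_self, if_true]
      exact Prod.ext (by rw [pvGo1]; simp [pvIndices]) (Prod.ext (by rw [pvGo2]; simp [pvIndices]) (by rw [pvGo3]; simp [pvIndices]))
    · simp only [hf, hn, Bool.and_false, Bool.false_eq_true, if_false]
      have hn' : ["NONAME"] ∉ l.map pvSecond := by
        simpa using hn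
      refine Prod.ext ?_ (Prod.ext ?_ ?_)
      · rw [pvGo1]; exact (pvNoMatch _ _ hn' 0).symm
      · rw [pvGo2]
        exact (pvNoMatch _ _ (fun hm => hn' (List.mem_of_mem_filter hm)) 0).symm
      · rw [pvGo3]; simp [pvIndices]
  · have hfilter : (l.map pvSecond).filter (fun item => !(item == ["NOFACE"])) = l.map pvSecond := by
      apply List.filter_eq_self.2
      intro a ha
      simp only [Bool.not_eq_eq_eq_not, Bool.not_true, beq_eq_false_iff_ne]
      rintro rfl
      exact hf (by simpa using ha)
    by_cases hn : (l.map pvSecond).contains ["NONAME"] = true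
    · simp only [hf, hn, Bool.false_and, Bool.false_eq_true, if_false]
      refine Prod.ext ?_ (Prod.ext ?_ ?_)
      · rw [pvGo1]; simp [pvIndices]
      · rw [pvGo2, hfilter]; simp [pvIndices]
      · rw [pvGo3]; simp [pvIndices]
    · simp only [hf, hn, Bool.false_and, Bool.false_eq_true, if_false]
      have hn' : ["NONAME"] ∉ l.map pvSecond := by simpa using hn
      refine Prod.ext ?_ (Prod.ext ?_ ?_)
      · rw [pvGo1]; exact (pvNoMatch _ _ hn' 0).symm
      · rw [pvGo2, hfilter]; exact (pvNoMatch _ _ hn' 0).symm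
      · rw [pvGo3]; simp [pvIndices]
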